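-- pv_equiv track=rewrite | github.com/weilunn97/Microsoft-OA-2020 | max_inserts.py | max_inserts
-- ===== SOURCE A (Python) =====
-- def max_inserts(s: str) -> int:
--     """
--     Time  : O(N)
--     Space : O(1), where N = len(s)
--     """
--
--     # CONVERT ALL TO LOWERCASE
--     s = s.lower()
--
--     # EDGE CASE
--     if "aaa" in s:
--         return -1
--
--     # COUNT THE NUMBER OF CONSECUTIVE 'a' WE'VE SEEN IMMEDIATELY BEFORE US
--     count = 0
--
--     # COUNT THE INSERTIONS PERFORMED
--     inserts = 0
--
--     # PROCESS EACH CHAR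
--     for char in s:
--
--         # CASE 1 - AN 'A' - DO NOT PERFORM INSERTION
--         if char == 'a':
--             count += 1
--
--         # CASE 2 - NOT AN 'A'
--         # DEPENDING ON THE NUMBER OF 'a' WE'VE SEEN BEFORE US, WE INSERT MORE 'a'
--         else:
--             inserts += 2 - count
--             count = 0
--
--     # FINAL INSERT
--     inserts += 2 - count
--     return inserts
-- ===== SOURCE B (Python) =====
-- def max_inserts(s: str) -> int:
--     s = s.lower()
--     if "aaa" in s:
--         return -1
--     # Closed form: (non-'a' chars + 1) boundaries each worth 2 inserts,
--     # minus 1 per existing 'a' (each 'a' uses up one slot of its run).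
--     return 2 * len(s) - 3 * s.count('a') + 2
-- ===== Notes on version B (the rewrite author's own statement) =====
-- stated objective: simpler
-- what changed: Replaced the run-counting loop and final flush with the closed form 2*len(s) - 3*s.count('a') + 2 after the same lowercase and triple-a guard.
import Mathlib
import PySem

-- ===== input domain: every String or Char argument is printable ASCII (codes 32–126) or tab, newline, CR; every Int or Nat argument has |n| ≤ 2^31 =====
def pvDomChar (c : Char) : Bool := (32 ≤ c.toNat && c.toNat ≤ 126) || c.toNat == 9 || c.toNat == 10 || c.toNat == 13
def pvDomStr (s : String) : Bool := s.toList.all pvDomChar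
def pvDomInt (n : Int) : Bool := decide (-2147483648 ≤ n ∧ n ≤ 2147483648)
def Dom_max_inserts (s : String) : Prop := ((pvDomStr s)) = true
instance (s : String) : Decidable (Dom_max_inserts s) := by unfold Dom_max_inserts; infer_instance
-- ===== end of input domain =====

-- B replaces A's run-counting loop with the closed form 2*len - 3*count('a') + 2 (simpler).


-- ===== PORT A =====
def max_inserts (s : String) : Int :=
  let s := PySem.Str.lower s
  if PySem.Str.isIn "aaa" s then -1
  else
    -- for char in s: accumulate (count, inserts)
    let st := s.toList.foldl
      (fun (st : Int × Int) char =>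
        if char = 'a' then (st.1 + 1, st.2)
        else (0, st.2 + (2 - st.1)))
      (0, 0)
    st.2 + (2 - st.1)

-- ===== PORT B =====
def max_inserts_alt (s : String) : Int :=
  let s := PySem.Str.lower s
  if PySem.Str.isIn "aaa" s then -1
  else 2 * (PySem.Str.len s : Int) - 3 * (PySem.Str.count s "a" : Int) + 2

-- ===== PRECONDITION & SPEC =====
def Spec_max_inserts (s : String) (out : Int) : Prop := out = max_inserts_alt s
instance (s : String) (out : Int) : Decidable (Spec_max_inserts s out) := by unfold Spec_max_inserts; infer_instance

-- ===== CLAIM (what is proved, stated in full; the proofs are below) =====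
def Claim_equal_max_inserts : Prop := ∀ (s : String), Dom_max_inserts s → Spec_max_inserts s (max_inserts s)

-- ===== LEMMAS AND PROOFS =====

-- s.count(c) for a one-char pattern counts the occurrences of that character
theorem chars_count_go_singleton (c : Char) (l : List Char) (fuel acc : Nat)
    (h : l.length ≤ fuel) :
    PySem.Chars.count.go [c] fuel l acc = acc + l.count c := by
  induction l generalizing fuel acc with
  | nil => cases fuel <;> simp [PySem.Chars.count.go]
  | cons x t ih =>
    cases fuel with
    | zero => simp at h
    | succ f =>
      simp only [PySem.Chars.count.go]
      by_cases hx : c = x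
      · subst hx
        simp only [List.isPrefixOf, List.cons_beq_cons, BEq.rfl, Bool.true_and,
          List.isPrefixOf_nil_left, if_true, List.length_cons, List.length_nil,
          Nat.zero_add, List.drop_succ_cons, List.drop_zero]
        rw [ih f (acc + 1) (by simpa using Nat.le_of_succ_le_succ h)]
        simp [List.count_cons]
        omega
      · have hnp : ¬ ([c].isPrefixOf (x :: t) = true) := by
          simp only [List.isPrefixOf, List.cons_beq_cons, List.isPrefixOf_nil_left,
            Bool.and_true]
          intro hb; exact hx (by simpa using hb)
        rw [if_neg hnp, ih f acc (by simpa using Nat.le_of_succ_le_succ h)]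
        have : (x == c) = false := by simp; intro hb; exact hx hb.symm
        simp [List.count_cons, this]

theorem chars_count_singleton (c : Char) (l : List Char) :
    PySem.Chars.count l [c] = l.count c := by
  simp [PySem.Chars.count, chars_count_go_singleton c l l.length 0 le_rfl]

-- loop invariant: the final flushed value of A's fold is a closed form
theorem fold_closed (l : List Char) (c i : Int) :
    (l.foldl (fun (st : Int × Int) char =>
        if char = 'a' then (st.1 + 1, st.2) else (0, st.2 + (2 - st.1))) (c, i)).2
      + (2 - (l.foldl (fun (st : Int × Int) char =>
        if char = 'a' then (st.1 + 1, st.2) else (0, st.2 + (2 - st.1))) (c, i)).1)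
    = i + (2 - c) + 2 * (l.length : Int) - 3 * (l.count 'a' : Int) := by
  induction l generalizing c i with
  | nil => simp
  | cons x t ih =>
    by_cases hx : x = 'a'
    · subst hx
      simp only [List.foldl_cons, if_pos rfl]
      rw [ih]
      simp [List.count_cons]
      ring
    · simp only [List.foldl_cons, if_neg hx]
      rw [ih]
      have hb : (x == 'a') = false := by simp [hx]
      simp [List.count_cons, hb]
      push_cast
      ring

-- ===== VERDICT (by name: the statement is the Claim_ definition above) =====
theorem max_inserts_spec : Claim_equal_max_inserts := by
  intro s _
  unfold Spec_max_inserts max_inserts max_inserts_alt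
  set t := PySem.Str.lower s with ht
  by_cases hin : PySem.Str.isIn "aaa" t
  · rw [if_pos hin, if_pos hin]
  · rw [if_neg hin, if_neg hin, fold_closed]
    have hcnt : PySem.Str.count t "a" = t.toList.count 'a' := by
      rw [PySem.Str.count_eq]
      exact chars_count_singleton 'a' t.toList
    have hlen : PySem.Str.len t = t.toList.length := PySem.Str.len_eq t
    rw [hcnt, hlen]
    ring
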